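-- pv_equiv track=rewrite | github.com/Infinidrix/competitive-programming | Camp Day 13/ambiguousCoordinates.py | fill_dots
-- ===== SOURCE A (Python) =====
-- def fill_dots(string):
--     if len(string) == 1:
--         return [string]
--     elif string[0] == "0" and string[-1] == "0":
--         return []
--     elif string[0] == "0":
--         return [string[0] + "." + string[1:]]
--     elif string[-1] == "0":
--         return [string]
--     else:
--         return [string[: i] + "." + string[i :] for i in range(1, len(string))] + [string]
-- ===== SOURCE B (Python) =====
-- def _valid(int_part, frac_part):
--     return (int_part == "0" or int_part[0] != "0") and frac_part[-1] != "0"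
--
-- def fill_dots(string):
--     out = [string[:i] + "." + string[i:] for i in range(1, len(string))
--            if _valid(string[:i], string[i:])]
--     if string == "0" or string[0] != "0":
--         out.append(string)
--     return out
-- ===== Notes on version B (the rewrite author's own statement) =====
-- stated objective: simpler
-- what changed: A's four-way case analysis on the first/last character is replaced by generate-and-filter: build every one-dot split plus the bare string and keep those passing a single validity predicate (integer part '0' or not 0-leading, fraction not 0-trailing).
import Mathlib
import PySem

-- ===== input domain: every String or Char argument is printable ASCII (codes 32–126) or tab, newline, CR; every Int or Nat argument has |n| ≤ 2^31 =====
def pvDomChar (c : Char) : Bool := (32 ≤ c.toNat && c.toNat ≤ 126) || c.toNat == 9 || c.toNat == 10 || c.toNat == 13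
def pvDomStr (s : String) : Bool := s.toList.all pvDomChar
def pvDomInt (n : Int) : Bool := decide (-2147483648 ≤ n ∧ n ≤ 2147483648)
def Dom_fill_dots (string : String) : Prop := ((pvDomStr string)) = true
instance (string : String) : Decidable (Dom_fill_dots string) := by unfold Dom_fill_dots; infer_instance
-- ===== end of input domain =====

-- B replaces A's four-way case analysis on the first/last characters by generate-and-filter
-- over all one-dot splits plus the bare string (objective: a simpler decomposition).

-- ===== PORT A =====
def fill_dots (string : String) : List String :=
  let cs := string.toList
  if cs.length == 1 then [string]
  else
    match PySem.List.pyGet? cs 0, PySem.List.pyGet? cs (-1) with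
    | some c0, some cl =>
      if c0 == '0' && cl == '0' then []
      else if c0 == '0' then
        [String.ofList ([c0] ++ '.' :: PySem.List.slice cs (some 1) none)]
      else if cl == '0' then [string]
      else
        ((PySem.List.pyRange 1 cs.length 1).map (fun i =>
          String.ofList (PySem.List.slice cs none (some i) ++ '.' ::
            PySem.List.slice cs (some i) none))) ++ [string]
    | _, _ => []

-- ===== PORT B =====
-- validity of one candidate split: integer part is '0' or not 0-leading, fraction not 0-trailing
def pvValid (intPart fracPart : List Char) : Bool :=
  (intPart == ['0'] || PySem.List.pyGet? intPart 0 != some '0')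
  && PySem.List.pyGet? fracPart (-1) != some '0'

def fill_dots_alt (string : String) : List String :=
  let cs := string.toList
  let out := ((PySem.List.pyRange 1 cs.length 1).filter (fun i =>
      pvValid (PySem.List.slice cs none (some i)) (PySem.List.slice cs (some i) none))).map
    (fun i => String.ofList (PySem.List.slice cs none (some i) ++ '.' ::
      PySem.List.slice cs (some i) none))
  if cs == ['0'] || PySem.List.pyGet? cs 0 != some '0' then out ++ [string] else out

-- ===== PRECONDITION & SPEC =====
-- Pre_ excludes only the empty string, on which both A and B raise IndexError.
def Pre_fill_dots (string : String) : Prop := string ≠ ""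
instance (string : String) : Decidable (Pre_fill_dots string) := by unfold Pre_fill_dots; infer_instance
def pvWitness_fill_dots : String := "1230"

def Spec_fill_dots (string : String) (out : List String) : Prop := out = fill_dots_alt string
instance (string : String) (out : List String) : Decidable (Spec_fill_dots string out) := by unfold Spec_fill_dots; infer_instance

-- ===== CLAIM (what is proved, stated in full; the proofs are below) =====
def Claim_equal_fill_dots : Prop := ∀ (string : String), Dom_fill_dots string → Pre_fill_dots string → Spec_fill_dots string (fill_dots string)

-- ===== LEMMAS AND PROOFS =====

theorem pv_pred_at (c0 : Char) (rest : List Char) (hrest : rest ≠ []) (cl : Char)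
    (hl : (c0 :: rest).getLast? = some cl) (i : Int) (h1 : 1 ≤ i)
    (h2 : i < ((c0 :: rest).length : Int)) :
    pvValid (PySem.List.slice (c0 :: rest) none (some i))
            (PySem.List.slice (c0 :: rest) (some i) none)
    = ((((i == 1) && (c0 == '0')) || !(c0 == '0')) && !(cl == '0')) := by
  have hlen : (c0 :: rest).length = rest.length + 1 := by simp
  rw [PySem.List.slice_to _ (by omega), PySem.List.slice_from _ (by omega)]
  have hk1 : 1 ≤ i.toNat := by omega
  have hk2 : i.toNat < (c0 :: rest).length := by omega
  have htake : (c0 :: rest).take i.toNat = c0 :: rest.take (i.toNat - 1) := by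
    obtain ⟨k, hk⟩ : ∃ k, i.toNat = k + 1 := ⟨i.toNat - 1, by omega⟩
    simp [hk]
  have htk : (rest.take (i.toNat - 1) = []) ↔ i = 1 := by
    rw [List.take_eq_nil_iff]
    constructor
    · rintro (h | h)
      · omega
      · exact absurd h hrest
    · intro h; left; omega
  have hdropLast : ((c0 :: rest).drop i.toNat).getLast? = some cl := by
    rw [List.getLast?_drop, if_neg (by omega), hl]
  have hget0 : PySem.List.pyGet? ((c0 :: rest).take i.toNat) 0 = some c0 := by
    rw [htake, PySem.List.pyGet?_zero_cons]
  have hgetl : PySem.List.pyGet? ((c0 :: rest).drop i.toNat) (-1) = some cl := by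
    rw [PySem.List.pyGet?_neg_one, hdropLast]
  have heqlist : ((c0 :: rest).take i.toNat == ['0']) = ((i == 1) && (c0 == '0')) := by
    rw [htake]
    by_cases hi : i = 1 <;> by_cases hc : c0 = '0' <;>
      simp [beq_eq_decide, hi, hc, htk]
  rw [pvValid, hget0, hgetl, heqlist]
  by_cases hc : c0 = '0' <;> by_cases hcl : cl = '0' <;> simp [hc, hcl, bne]

theorem pv_main (s : String) (c0 : Char) (rest : List Char) (hrw : s.toList = c0 :: rest) :
    fill_dots s = fill_dots_alt s := by
  match rest with
  | [] =>
      by_cases hc : c0 = '0' <;>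
        simp [fill_dots, fill_dots_alt, hrw, hc,
          PySem.List.pyRange_one_eq_nil (le_refl (1 : Int)), bne]
  | r :: rs =>
      obtain ⟨cl, hl⟩ : ∃ cl, (c0 :: r :: rs).getLast? = some cl :=
        ⟨_, List.getLast?_eq_some_getLast (by simp)⟩
      have hg0 : PySem.List.pyGet? (c0 :: r :: rs) 0 = some c0 :=
        PySem.List.pyGet?_zero_cons _ _
      have hgl : PySem.List.pyGet? (c0 :: r :: rs) (-1) = some cl := by
        rw [PySem.List.pyGet?_neg_one, hl]
      have hcast : ((c0 :: r :: rs).length : Int) = (rs.length : Int) + 1 + 1 := by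
        simp only [List.length_cons]; push_cast; ring
      by_cases hc : c0 = '0' <;> by_cases hcl : cl = '0'
      · subst hc; subst hcl
        have hfil : ((PySem.List.pyRange 1 ((rs.length : Int) + 1 + 1) 1).filter (fun i =>
            pvValid (PySem.List.slice ('0' :: r :: rs) none (some i))
              (PySem.List.slice ('0' :: r :: rs) (some i) none))) = [] := by
          rw [List.filter_eq_nil_iff]
          intro i hi
          obtain ⟨h1, h2⟩ := PySem.List.mem_pyRange_one.mp hi
          rw [pv_pred_at '0' (r :: rs) (by simp) '0' hl i h1 (by rw [hcast]; omega)]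
          simp
        simp [fill_dots, fill_dots_alt, hrw, hg0, hgl, hfil, bne]
      · subst hc
        have hlt : (1 : Int) < (('0' :: r :: rs).length : Int) := by rw [hcast]; omega
        have hsplit : PySem.List.pyRange 1 ((rs.length : Int) + 1 + 1) 1
            = 1 :: PySem.List.pyRange 2 ((rs.length : Int) + 1 + 1) 1 := by
          rw [PySem.List.pyRange_one_cons (by omega)]; norm_num
        have hfiltail : ((PySem.List.pyRange 2 ((rs.length : Int) + 1 + 1) 1).filter (fun i =>
            pvValid (PySem.List.slice ('0' :: r :: rs) none (some i))
              (PySem.List.slice ('0' :: r :: rs) (some i) none))) = [] := by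
          rw [List.filter_eq_nil_iff]
          intro i hi
          obtain ⟨h1, h2⟩ := PySem.List.mem_pyRange_one.mp hi
          rw [pv_pred_at '0' (r :: rs) (by simp) cl hl i (by omega) (by rw [hcast]; omega)]
          have hne1 : (i == (1:Int)) = false := by simp; omega
          simp [hne1]
        have hpred1 : pvValid (PySem.List.slice ('0' :: r :: rs) none (some 1))
            (PySem.List.slice ('0' :: r :: rs) (some 1) none) = true := by
          rw [pv_pred_at '0' (r :: rs) (by simp) cl hl 1 le_rfl hlt]
          simp [hcl]
        have h1take : PySem.List.slice ('0' :: r :: rs) none (some 1) = ['0'] := by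
          rw [PySem.List.slice_to _ (by omega)]; rfl
        have h1drop : PySem.List.slice ('0' :: r :: rs) (some 1) none = r :: rs := by
          rw [PySem.List.slice_from _ (by omega)]; rfl
        have hpred1' : pvValid ['0'] (r :: rs) = true := by
          rw [← h1take, ← h1drop]; exact hpred1
        simp [fill_dots, fill_dots_alt, hrw, hcl, hg0, hgl, hsplit,
          hpred1', hfiltail, h1take, h1drop, bne]
        rw [show ("0" : String) = String.ofList ['0'] from rfl, ← String.ofList_append, List.singleton_append]
      · subst hcl
        have hfil : ((PySem.List.pyRange 1 ((rs.length : Int) + 1 + 1) 1).filter (fun i =>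
            pvValid (PySem.List.slice (c0 :: r :: rs) none (some i))
              (PySem.List.slice (c0 :: r :: rs) (some i) none))) = [] := by
          rw [List.filter_eq_nil_iff]
          intro i hi
          obtain ⟨h1, h2⟩ := PySem.List.mem_pyRange_one.mp hi
          rw [pv_pred_at c0 (r :: rs) (by simp) '0' hl i h1 (by rw [hcast]; omega)]
          simp
        simp [fill_dots, fill_dots_alt, hrw, hc, hg0, hgl, hfil, bne]
      · have hfil : ((PySem.List.pyRange 1 ((rs.length : Int) + 1 + 1) 1).filter (fun i =>
            pvValid (PySem.List.slice (c0 :: r :: rs) none (some i))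
              (PySem.List.slice (c0 :: r :: rs) (some i) none)))
            = PySem.List.pyRange 1 ((rs.length : Int) + 1 + 1) 1 := by
          rw [List.filter_eq_self]
          intro i hi
          obtain ⟨h1, h2⟩ := PySem.List.mem_pyRange_one.mp hi
          rw [pv_pred_at c0 (r :: rs) (by simp) cl hl i h1 (by rw [hcast]; omega)]
          simp [hc, hcl]
        simp [fill_dots, fill_dots_alt, hrw, hc, hcl, hg0, hgl, hfil, bne]

-- ===== VERDICT (by name: the statement is the Claim_ definition above) =====
theorem fill_dots_spec : Claim_equal_fill_dots := by
  intro s _ hpre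
  have hcs : s.toList ≠ [] := by
    intro h
    apply hpre
    simpa [String.ofList_toList] using congrArg String.ofList h
  obtain ⟨c0, rest, hrw⟩ := List.exists_cons_of_ne_nil hcs
  exact pv_main s c0 rest hrw
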